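-- pv_equiv track=rewrite | github.com/davidrogger/trybe-webdev-fullstack-course | 04-ciencia-da-computacao/m04-section-05-data-structure-i/m04s05d02-arrays/m04s05d02-exercise-day/m04s05d02e05.py | server_communication
-- ===== SOURCE A (Python) =====
-- def server_communication(servers):
--     rows_quantity = len(servers)
--     next_element = 1
--     total_communication = 0
--
--     for row in range(rows_quantity - 1):
--         columns_quantity = len(servers[row])
--         currenty_row = servers[row]
--         next_row = servers[next_element]
--         current_communication = 0
--         for column in range(columns_quantity):
--             has_computer = 1
--             if (
--                 currenty_row[column] == has_computer
--                 and next_row[column] == has_computer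
--             ):
--                 current_communication += 2
--             elif (
--                 current_communication > 0
--                 and currenty_row[column] == has_computer
--             ):
--                 current_communication += 1
--             elif (
--                 current_communication > 0 and next_row[column] == has_computer
--             ):
--                 current_communication += 1
--         total_communication += current_communication
--         next_element += 1
--
--     return total_communication
-- ===== SOURCE B (Python) =====
-- def server_communication(servers):
--     total = 0
--     for i in range(len(servers) - 1):
--         cur = servers[i]
--         nxt = servers[i + 1]
--         start = next(
--             (c for c in range(len(cur)) if cur[c] == 1 and nxt[c] == 1),
--             None,
--         )
--         if start is not None:
--             total += sum(
--                 (cur[c] == 1) + (nxt[c] == 1) for c in range(start, len(cur))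
--             )
--     return total
-- ===== Notes on version B (the rewrite author's own statement) =====
-- stated objective: simpler
-- what changed: Replaces A's running-state three-way branch machine per row pair by a two-phase pass: find the first column where both adjacent rows have a 1, then sum the 1-cells of both rows from that column on; pairs with no such column contribute 0.
import Mathlib
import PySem

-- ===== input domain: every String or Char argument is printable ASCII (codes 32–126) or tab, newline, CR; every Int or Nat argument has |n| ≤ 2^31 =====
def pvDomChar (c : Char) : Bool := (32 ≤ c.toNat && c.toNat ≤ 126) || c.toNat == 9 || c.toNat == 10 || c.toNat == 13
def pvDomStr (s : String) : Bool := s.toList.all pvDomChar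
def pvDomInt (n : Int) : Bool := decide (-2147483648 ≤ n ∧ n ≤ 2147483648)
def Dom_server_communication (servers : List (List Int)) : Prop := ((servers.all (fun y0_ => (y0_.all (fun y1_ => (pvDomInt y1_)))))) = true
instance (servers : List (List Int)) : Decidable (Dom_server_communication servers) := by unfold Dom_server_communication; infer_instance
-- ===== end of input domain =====

-- B replaces A's per-pair running-state three-way branch machine by a two-phase pass (find the
-- first column where both adjacent rows hold a 1, then sum the 1-cells of both rows from there
-- on); objective: simpler.

-- ===== PORT A =====
def server_communication (servers : List (List Int)) : Int :=
  let rows_quantity : Int := servers.length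
  let st := (PySem.List.pyRange 0 (rows_quantity - 1) 1).foldl (fun (st : Int × Int) row =>
    let currenty_row := PySem.List.pyGetD servers row []
    let columns_quantity : Int := currenty_row.length
    let next_row := PySem.List.pyGetD servers st.1 []
    let comm := (PySem.List.pyRange 0 columns_quantity 1).foldl (fun (comm : Int) column =>
      if PySem.List.pyGetD currenty_row column 0 = 1 ∧ PySem.List.pyGetD next_row column 0 = 1 then
        comm + 2
      else if comm > 0 ∧ PySem.List.pyGetD currenty_row column 0 = 1 then
        comm + 1
      else if comm > 0 ∧ PySem.List.pyGetD next_row column 0 = 1 then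
        comm + 1
      else comm) 0
    (st.1 + 1, st.2 + comm)) ((1 : Int), (0 : Int))
  st.2

-- ===== PORT B =====
def server_communication_alt (servers : List (List Int)) : Int :=
  (List.range (servers.length - 1)).foldl (fun total i =>
    let cur := servers.getD i []
    let nxt := servers.getD (i + 1) []
    match (List.range cur.length).find?
        (fun c => decide (cur.getD c 0 = 1) && decide (nxt.getD c 0 = 1)) with
    | none => total
    | some start =>
        total + ((List.range' start (cur.length - start)).map
          (fun c => (if cur.getD c 0 = 1 then (1 : Int) else 0)
                  + (if nxt.getD c 0 = 1 then (1 : Int) else 0))).sum) 0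

-- ===== PRECONDITION & SPEC =====
-- Pre_ excludes exactly the ragged grids on which the Python A raises IndexError (some row has a
-- column A actually reads — a 1-cell, or any column once communication started — that is missing
-- from the shorter following row); B raises IndexError on exactly those inputs too.
def Pre_server_communication (servers : List (List Int)) : Prop :=
  ∀ i < servers.length - 1,
    ∀ c < (servers.getD i []).length, (servers.getD (i + 1) []).length ≤ c →
      (servers.getD i []).getD c 0 ≠ 1 ∧
      ¬ ∃ d < (servers.getD (i + 1) []).length,
          (servers.getD i []).getD d 0 = 1 ∧ (servers.getD (i + 1) []).getD d 0 = 1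
instance (servers : List (List Int)) : Decidable (Pre_server_communication servers) := by
  unfold Pre_server_communication; infer_instance

def pvWitness_server_communication : List (List Int) := [[1, 0], [1, 1], [0, 1]]

def Spec_server_communication (servers : List (List Int)) (out : Int) : Prop := out = server_communication_alt servers
instance (servers : List (List Int)) (out : Int) : Decidable (Spec_server_communication servers out) := by unfold Spec_server_communication; infer_instance

-- ===== CLAIM (what is proved, stated in full; the proofs are below) =====
def Claim_equal_server_communication : Prop := ∀ (servers : List (List Int)), Dom_server_communication servers → Pre_server_communication servers → Spec_server_communication servers (server_communication servers)

-- ===== LEMMAS AND PROOFS =====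

-- A's inner-loop step on column c of the row pair (cur, nxt)
def pvStep (cur nxt : List Int) (comm : Int) (c : Nat) : Int :=
  if cur.getD c 0 = 1 ∧ nxt.getD c 0 = 1 then comm + 2
  else if comm > 0 ∧ cur.getD c 0 = 1 then comm + 1
  else if comm > 0 ∧ nxt.getD c 0 = 1 then comm + 1
  else comm

-- number of 1-cells the row pair (cur, nxt) holds in column c
def pvCnt (cur nxt : List Int) (c : Nat) : Int :=
  (if cur.getD c 0 = 1 then (1 : Int) else 0) + (if nxt.getD c 0 = 1 then (1 : Int) else 0)

-- A's inner-loop value for the row pair at index k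
def pvContrib (servers : List (List Int)) (k : Nat) : Int :=
  (List.range' 0 (servers.getD k []).length).foldl
    (pvStep (servers.getD k []) (servers.getD (k + 1) [])) 0

-- B's per-pair value for the row pair at index i
def pvBval (servers : List (List Int)) (i : Nat) : Int :=
  let cur := servers.getD i []
  let nxt := servers.getD (i + 1) []
  match (List.range cur.length).find?
      (fun c => decide (cur.getD c 0 = 1) && decide (nxt.getD c 0 = 1)) with
  | none => 0
  | some start =>
      ((List.range' start (cur.length - start)).map
        (fun c => (if cur.getD c 0 = 1 then (1 : Int) else 0)
                + (if nxt.getD c 0 = 1 then (1 : Int) else 0))).sum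

-- once A's running count is positive, every remaining 1-cell of either row adds one
theorem pvStep_pos (cur nxt : List Int) : ∀ (k s : Nat) (comm : Int), 0 < comm →
    (List.range' s k).foldl (pvStep cur nxt) comm
      = comm + ((List.range' s k).map (pvCnt cur nxt)).sum := by
  intro k
  induction k with
  | zero => simp
  | succ k ih =>
    intro s comm hc
    rw [List.range'_succ]
    simp only [List.foldl_cons, List.map_cons, List.sum_cons]
    have hstep : pvStep cur nxt comm s = comm + pvCnt cur nxt s := by
      unfold pvStep pvCnt
      split_ifs with h1 h2 h3 <;> omega
    rw [hstep, ih (s + 1) _ (by unfold pvCnt at *; split_ifs at * <;> omega)]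
    ring

-- A's state machine from count 0 = find-first-shared-column, then count the 1-cells from there
theorem pvInner_eq (cur nxt : List Int) : ∀ (k s : Nat),
    (List.range' s k).foldl (pvStep cur nxt) 0
      = (match (List.range' s k).find?
            (fun c => decide (cur.getD c 0 = 1) && decide (nxt.getD c 0 = 1)) with
         | none => (0 : Int)
         | some start => ((List.range' start (s + k - start)).map (pvCnt cur nxt)).sum) := by
  intro k
  induction k with
  | zero => simp
  | succ k ih =>
    intro s
    rw [List.range'_succ]
    simp only [List.foldl_cons, List.find?_cons]
    by_cases h : cur.getD s 0 = 1 ∧ nxt.getD s 0 = 1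
    · have hp : (decide (cur.getD s 0 = 1) && decide (nxt.getD s 0 = 1)) = true := by
        have h1 := h.1; have h2 := h.2; simp only [List.getD] at h1 h2; simp [h1, h2]
      rw [hp]
      simp only []
      have : pvStep cur nxt 0 s = 2 := by
        unfold pvStep; rw [if_pos (by simpa [List.getD] using h)]; norm_num
      rw [this, pvStep_pos cur nxt k (s + 1) 2 (by omega)]
      have hr : s + (k + 1) - s = k + 1 := by omega
      rw [hr, List.range'_succ]
      simp only [List.map_cons, List.sum_cons]
      have : pvCnt cur nxt s = 2 := by
        unfold pvCnt; rw [if_pos (show _ from h.1), if_pos (show _ from h.2)]; norm_num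
      rw [this]
    · have hp : (decide (cur.getD s 0 = 1) && decide (nxt.getD s 0 = 1)) = false := by
        rcases Decidable.not_and_iff_or_not.mp h with h' | h' <;>
          simp only [h', decide_false, Bool.false_and, Bool.and_false]
      rw [hp]
      have : pvStep cur nxt 0 s = 0 := by
        unfold pvStep; split_ifs with h1 h2 <;> omega
      rw [this, ih (s + 1)]
      have hlen : s + 1 + k = s + (k + 1) := by omega
      rw [hlen]

-- A's inner pyRange fold in Nat index form
theorem innerA_eq (cur nxt : List Int) :
    (PySem.List.pyRange 0 (cur.length : Int) 1).foldl (fun (comm : Int) column =>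
      if PySem.List.pyGetD cur column 0 = 1 ∧ PySem.List.pyGetD nxt column 0 = 1 then comm + 2
      else if comm > 0 ∧ PySem.List.pyGetD cur column 0 = 1 then comm + 1
      else if comm > 0 ∧ PySem.List.pyGetD nxt column 0 = 1 then comm + 1
      else comm) 0
    = (List.range' 0 cur.length).foldl (pvStep cur nxt) 0 := by
  rw [PySem.List.pyRange_one]
  simp only [sub_zero, Int.toNat_natCast, List.foldl_map, zero_add,
    PySem.List.pyGetD_natCast, List.range_eq_range']
  rfl

-- A's outer loop: next_element always equals row + 1, and the total is a per-pair sum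
theorem outerA_inv (servers : List (List Int)) : ∀ (m j : Nat) (acc : Int),
    (List.range' j m).foldl (fun (st : Int × Int) (row : Nat) =>
      (st.1 + 1, st.2 + (List.range' 0 (servers.getD row []).length).foldl
        (pvStep (servers.getD row []) (PySem.List.pyGetD servers st.1 [])) 0))
      ((j : Int) + 1, acc)
    = (((j + m : Nat) : Int) + 1, acc + ((List.range' j m).map (pvContrib servers)).sum) := by
  intro m
  induction m with
  | zero => simp
  | succ m ih =>
    intro j acc
    rw [List.range'_succ]
    simp only [List.foldl_cons, List.map_cons, List.sum_cons]
    have hc : ((j : Int) + 1) = ((j + 1 : Nat) : Int) := by push_cast; ring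
    rw [hc, PySem.List.pyGetD_natCast]
    rw [ih (j + 1) _]
    refine Prod.ext ?_ ?_
    · show ((j + 1 + m : Nat) : Int) + 1 = ((j + (m + 1) : Nat) : Int) + 1
      push_cast; ring
    · show acc + _ + _ = acc + (pvContrib servers j + _)
      simp only [pvContrib]
      ring

-- B's outer fold is the sum of its per-pair values
theorem altB_eq (servers : List (List Int)) : ∀ (l : List Nat) (total : Int),
    l.foldl (fun total i =>
      let cur := servers.getD i []
      let nxt := servers.getD (i + 1) []
      match (List.range cur.length).find?
          (fun c => decide (cur.getD c 0 = 1) && decide (nxt.getD c 0 = 1)) with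
      | none => total
      | some start =>
          total + ((List.range' start (cur.length - start)).map
            (fun c => (if cur.getD c 0 = 1 then (1 : Int) else 0)
                    + (if nxt.getD c 0 = 1 then (1 : Int) else 0))).sum) total
    = total + (l.map (pvBval servers)).sum := by
  intro l
  induction l with
  | nil => simp
  | cons i l ih =>
    intro total
    simp only [List.foldl_cons, List.map_cons, List.sum_cons]
    by_cases h : ((List.range (servers.getD i []).length).find?
        (fun c => decide ((servers.getD i []).getD c 0 = 1)
               && decide ((servers.getD (i + 1) []).getD c 0 = 1))).isSome
    · obtain ⟨start, hs⟩ := Option.isSome_iff_exists.mp h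
      simp only [pvBval, hs, ih]
      ring
    · rw [Option.not_isSome_iff_eq_none] at h
      simp only [pvBval, h, ih]
      ring

theorem pvBval_eq_contrib (servers : List (List Int)) (i : Nat) :
    pvBval servers i = pvContrib servers i := by
  simp only [pvBval, pvContrib, pvInner_eq, List.range_eq_range', Nat.zero_add]
  rfl

theorem pv_main (servers : List (List Int)) :
    server_communication servers = server_communication_alt servers := by
  unfold server_communication server_communication_alt
  dsimp only
  rw [altB_eq]
  rcases servers with _ | ⟨r, rest⟩
  · norm_num
  · have hlen : ((((r :: rest).length : Int)) - 1) = (((r :: rest).length - 1 : Nat) : Int) := by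
      simp [List.length_cons]
    rw [hlen, PySem.List.pyRange_one]
    simp only [sub_zero, Int.toNat_natCast, List.foldl_map, zero_add,
      PySem.List.pyGetD_natCast, innerA_eq, List.range_eq_range']
    have h0 : ((1 : Int), (0 : Int)) = (((0 : Nat) : Int) + 1, (0 : Int)) := by norm_num
    rw [h0, outerA_inv]
    simp only [zero_add]
    congr 1
    exact List.map_congr_left (fun i _ => (pvBval_eq_contrib ((r : List Int) :: rest) i).symm)

-- ===== VERDICT (by name: the statement is the Claim_ definition above) =====
theorem server_communication_spec : Claim_equal_server_communication := by
  intro servers _ _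
  unfold Spec_server_communication
  exact pv_main servers
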